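-- pv_equiv track=rewrite | github.com/mbaljko/vault-grading-pipeline | 01_units/pipelines/pl1C_rubric_devt/python/generate-layer3-grade-award-report.py | build_layer3_dimension_histogram_rows
-- ===== SOURCE A (Python) =====
-- from collections import Counter, defaultdict
--
-- MAX_HISTOGRAM_BAR_WIDTH = 20
--
-- def compute_histogram_resolution(max_count: int, max_width: int = MAX_HISTOGRAM_BAR_WIDTH) -> int:
--     if max_count <= 0:
--         return 1
--     return max(1, (max_count + max_width - 1) // max_width)
--
-- def render_histogram_bar(count: int, resolution: int) -> str:
--     if count <= 0:
--         return ""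
--     bar_width = max(1, (count + resolution - 1) // resolution)
--     return "█" * bar_width
--
-- def build_histogram_resolution_note(resolution: int, max_width: int = MAX_HISTOGRAM_BAR_WIDTH) -> str:
--     if resolution == 1:
--         return f"Resolution: 1 block = 1 count; max width = {max_width} blocks."
--     return f"Resolution: 1 block ~= {resolution} counts; max width = {max_width} blocks."
--
-- def build_layer3_dimension_histogram_rows(
--     aggregate_counts: dict[str, Counter[str]],
-- ) -> tuple[list[list[str]], str]:
--     dimension_ids = [dimension_id for dimension_id in ("D*1", "D*2", "D*3") if dimension_id in aggregate_counts]
--     if not dimension_ids: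
--         return [], build_histogram_resolution_note(1)
--
--     ordered_bins = [
--         ("0-little_to_no_demonstration", "little_to_no_demonstration"),
--         ("1-partially_demonstrated", "partially_demonstrated"),
--         ("2-demonstrated", "demonstrated"),
--     ]
--     max_count = max(
--         (
--             aggregate_counts[dimension_id].get(raw_label, 0)
--             for dimension_id in dimension_ids
--             for _, raw_label in ordered_bins
--         ),
--         default=0,
--     )
--     resolution = compute_histogram_resolution(max_count)
--     table_rows: list[list[str]] = []
--     for display_label, raw_label in ordered_bins:
--         count_lines: list[str] = []
--         bar_lines: list[str] = []
--         for dimension_id in dimension_ids: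
--             bin_count = aggregate_counts[dimension_id].get(raw_label, 0)
--             count_lines.append(str(bin_count))
--             bar_lines.append(render_histogram_bar(bin_count, resolution))
--         table_rows.append([display_label, "<br>".join(count_lines), "<br>".join(bar_lines)])
--     table_rows.append([
--         "Total",
--         "<br>".join(str(sum(aggregate_counts[dimension_id].values())) for dimension_id in dimension_ids),
--         "",
--     ])
--     return table_rows, build_histogram_resolution_note(resolution)
-- ===== SOURCE B (Python) =====
-- MAX_HISTOGRAM_BAR_WIDTH = 20
--
--
-- def compute_histogram_resolution(max_count, max_width=MAX_HISTOGRAM_BAR_WIDTH):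
--     if max_count <= 0:
--         return 1
--     return max(1, (max_count + max_width - 1) // max_width)
--
--
-- def render_histogram_bar(count, resolution):
--     if count <= 0:
--         return ""
--     return "█" * max(1, (count + resolution - 1) // resolution)
--
--
-- def build_histogram_resolution_note(resolution, max_width=MAX_HISTOGRAM_BAR_WIDTH):
--     if resolution == 1:
--         return f"Resolution: 1 block = 1 count; max width = {max_width} blocks."
--     return f"Resolution: 1 block ~= {resolution} counts; max width = {max_width} blocks."
--
--
-- RAW_LABELS = ("little_to_no_demonstration", "partially_demonstrated", "demonstrated")
-- DISPLAY_LABELS = ("0-little_to_no_demonstration", "1-partially_demonstrated", "2-demonstrated")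
--
--
-- def build_layer3_dimension_histogram_rows(aggregate_counts):
--     # Work on the present counters directly, in the fixed dimension order.
--     present = [aggregate_counts[d] for d in ("D*1", "D*2", "D*3") if d in aggregate_counts]
--     if not present:
--         return [], build_histogram_resolution_note(1)
--     # Pass 1 (transposed, dimension-outer): running maximum over the grid.
--     max_count = 0
--     for ctr in present:
--         for raw in RAW_LABELS:
--             c = ctr.get(raw, 0)
--             if max_count < c:
--                 max_count = c
--     resolution = compute_histogram_resolution(max_count)
--     # Pass 2 (transposed): seed each table cell from the first dimension, then grow
--     # every cell string in place with "<br>" + piece per further dimension; the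
--     # per-dimension total is fused into the same sweep.
--     first, rest = present[0], present[1:]
--     counts = [str(first.get(raw, 0)) for raw in RAW_LABELS]
--     bars = [render_histogram_bar(first.get(raw, 0), resolution) for raw in RAW_LABELS]
--     total = str(sum(first.values()))
--     for ctr in rest:
--         for i, raw in enumerate(RAW_LABELS):
--             counts[i] += "<br>" + str(ctr.get(raw, 0))
--             bars[i] += "<br>" + render_histogram_bar(ctr.get(raw, 0), resolution)
--         total += "<br>" + str(sum(ctr.values()))
--     rows = [[DISPLAY_LABELS[i], counts[i], bars[i]] for i in range(3)]
--     rows.append(["Total", total, ""])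
--     return rows, build_histogram_resolution_note(resolution)
-- ===== Notes on version B (the rewrite author's own statement) =====
-- stated objective: alternative
-- what changed: B transposes the construction: instead of A's bin-outer rendering (per-bin string lists joined with '<br>' plus a separate generator max-scan), B sweeps dimension-outer twice - a running-max pass, then one pass that grows every table cell string in place with '<br>' + piece, fusing the per-dimension totals into the same sweep - and finally reads the rows off the finished cells.
import Mathlib
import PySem

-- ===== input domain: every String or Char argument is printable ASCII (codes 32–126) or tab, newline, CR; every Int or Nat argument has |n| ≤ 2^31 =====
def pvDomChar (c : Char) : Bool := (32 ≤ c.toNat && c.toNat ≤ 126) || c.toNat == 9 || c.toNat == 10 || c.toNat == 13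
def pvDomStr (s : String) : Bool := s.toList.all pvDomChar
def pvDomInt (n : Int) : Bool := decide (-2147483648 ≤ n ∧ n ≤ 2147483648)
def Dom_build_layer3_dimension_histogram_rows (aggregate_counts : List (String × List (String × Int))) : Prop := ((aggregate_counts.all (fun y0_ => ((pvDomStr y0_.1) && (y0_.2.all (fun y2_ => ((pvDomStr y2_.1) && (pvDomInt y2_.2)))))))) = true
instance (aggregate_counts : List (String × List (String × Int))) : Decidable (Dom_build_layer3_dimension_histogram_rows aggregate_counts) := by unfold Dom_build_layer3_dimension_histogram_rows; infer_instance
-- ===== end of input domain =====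

-- B replaces A's bin-outer rows (list accumulators joined with "<br>" per bin, plus a separate
-- generator max) by a transposed, dimension-outer sweep: a running-max pass, then one pass that
-- grows every table cell string in place with "<br>" + piece and fuses the totals into the same
-- sweep; the rows are read off the finished cells (alternative decomposition, same cost).

-- ===== PORT A =====
-- module helpers shared by both Python programs (Source B carries the same three helpers verbatim)
def pvResolution (max_count : Int) : Int :=
  if max_count ≤ 0 then 1 else max 1 (PySem.Int.floordiv (max_count + 20 - 1) 20)

def pvBar (count : Int) (resolution : Int) : String :=
  if count ≤ 0 then "" else
    String.ofList (List.replicate (max 1 (PySem.Int.floordiv (count + resolution - 1) resolution)).toNat '█')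

def pvNote (resolution : Int) : String :=
  if resolution = 1 then "Resolution: 1 block = 1 count; max width = 20 blocks."
  else "Resolution: 1 block ~= " ++ PySem.Int.toStr resolution ++ " counts; max width = 20 blocks."

def pvBins : List (String × String) :=
  [("0-little_to_no_demonstration", "little_to_no_demonstration"),
   ("1-partially_demonstrated", "partially_demonstrated"),
   ("2-demonstrated", "demonstrated")]

-- the Python dict-of-Counters argument, and the filtered dimension-id list (first line of A)
def pvAC (aggregate_counts : List (String × List (String × Int))) : PySem.Dict String (PySem.Dict String Int) :=
  PySem.Dict.ofList (aggregate_counts.map (fun p => (p.1, PySem.Dict.ofList p.2)))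

def pvDims (ac : PySem.Dict String (PySem.Dict String Int)) : List String :=
  ["D*1", "D*2", "D*3"].filter (fun d => ac.contains d)

-- aggregate_counts[d].get(raw, 0)
def pvCnt (ac : PySem.Dict String (PySem.Dict String Int)) (d raw : String) : Int :=
  (ac.getD d PySem.Dict.empty).getD raw 0

-- sum(aggregate_counts[d].values())
def pvTotal (ac : PySem.Dict String (PySem.Dict String Int)) (d : String) : Int :=
  (ac.getD d PySem.Dict.empty).values.sum

-- A's max_count: generator over dimension_ids (outer) × ordered_bins (inner), default 0
def pvMaxA (ac : PySem.Dict String (PySem.Dict String Int)) (dims : List String) : Int :=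
  PySem.List.maxD (dims.flatMap (fun d => pvBins.map (fun b => pvCnt ac d b.2))) (fun x => x) 0

-- A's inner loop: count_lines/bar_lines accumulators over dimension_ids
def pvLinesA (ac : PySem.Dict String (PySem.Dict String Int)) (dims : List String) (res : Int)
    (raw : String) : List String × List String :=
  dims.foldl
    (fun acc d =>
      (acc.1 ++ [PySem.Int.toStr (pvCnt ac d raw)], acc.2 ++ [pvBar (pvCnt ac d raw) res]))
    ([], [])

-- A's outer loop over ordered_bins, appending one table row per bin
def pvRowsA (ac : PySem.Dict String (PySem.Dict String Int)) (dims : List String) (res : Int) :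
    List (List String) :=
  pvBins.foldl
    (fun rows b =>
      rows ++ [[b.1, PySem.Str.join "<br>" (pvLinesA ac dims res b.2).1,
                PySem.Str.join "<br>" (pvLinesA ac dims res b.2).2]])
    []

def build_layer3_dimension_histogram_rows (aggregate_counts : List (String × List (String × Int))) : List (List String) × String :=
  if pvDims (pvAC aggregate_counts) = [] then ([], pvNote 1)
  else
    (pvRowsA (pvAC aggregate_counts) (pvDims (pvAC aggregate_counts))
        (pvResolution (pvMaxA (pvAC aggregate_counts) (pvDims (pvAC aggregate_counts)))) ++
      [["Total",
        PySem.Str.join "<br>"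
          ((pvDims (pvAC aggregate_counts)).map
            (fun d => PySem.Int.toStr (pvTotal (pvAC aggregate_counts) d))),
        ""]],
     pvNote (pvResolution (pvMaxA (pvAC aggregate_counts) (pvDims (pvAC aggregate_counts)))))

-- ===== PORT B =====
-- RAW_LABELS / DISPLAY_LABELS of Source B
def pvRaw0 : String := "little_to_no_demonstration"
def pvRaw1 : String := "partially_demonstrated"
def pvRaw2 : String := "demonstrated"

-- present = the Counters of the dimensions that are there, in the fixed order
def pvPresent (ac : PySem.Dict String (PySem.Dict String Int)) : List (PySem.Dict String Int) :=
  (["D*1", "D*2", "D*3"].filter (fun d => ac.contains d)).map (fun d => ac.getD d PySem.Dict.empty)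

-- pass 1: the running maximum (dimension-outer, the three raw labels inner)
def pvMaxLoop (present : List (PySem.Dict String Int)) : Int :=
  present.foldl
    (fun m ctr =>
      [pvRaw0, pvRaw1, pvRaw2].foldl
        (fun m raw => let c := ctr.getD raw 0; if m < c then c else m) m)
    0

-- one cell-growing step of pass 2 (Source B's inner 'for i, raw in enumerate(RAW_LABELS)' unrolled
-- over the literal 3-tuple, plus the fused total); cells are carried as char lists
def pvCellStep (res : Int)
    (st : List Char × List Char × List Char × List Char × List Char × List Char × List Char)
    (ctr : PySem.Dict String Int) :
    List Char × List Char × List Char × List Char × List Char × List Char × List Char :=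
  (st.1 ++ "<br>".toList ++ (PySem.Int.toStr (ctr.getD pvRaw0 0)).toList,
   st.2.1 ++ "<br>".toList ++ (PySem.Int.toStr (ctr.getD pvRaw1 0)).toList,
   st.2.2.1 ++ "<br>".toList ++ (PySem.Int.toStr (ctr.getD pvRaw2 0)).toList,
   st.2.2.2.1 ++ "<br>".toList ++ (pvBar (ctr.getD pvRaw0 0) res).toList,
   st.2.2.2.2.1 ++ "<br>".toList ++ (pvBar (ctr.getD pvRaw1 0) res).toList,
   st.2.2.2.2.2.1 ++ "<br>".toList ++ (pvBar (ctr.getD pvRaw2 0) res).toList,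
   st.2.2.2.2.2.2 ++ "<br>".toList ++ (PySem.Int.toStr ctr.values.sum).toList)

-- the cells seeded from the first dimension
def pvCellInit (res : Int) (first : PySem.Dict String Int) :
    List Char × List Char × List Char × List Char × List Char × List Char × List Char :=
  ((PySem.Int.toStr (first.getD pvRaw0 0)).toList,
   (PySem.Int.toStr (first.getD pvRaw1 0)).toList,
   (PySem.Int.toStr (first.getD pvRaw2 0)).toList,
   (pvBar (first.getD pvRaw0 0) res).toList,
   (pvBar (first.getD pvRaw1 0) res).toList,
   (pvBar (first.getD pvRaw2 0) res).toList,
   (PySem.Int.toStr first.values.sum).toList)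

def build_layer3_dimension_histogram_rows_alt (aggregate_counts : List (String × List (String × Int))) : List (List String) × String :=
  match pvPresent (pvAC aggregate_counts) with
  | [] => ([], pvNote 1)
  | first :: rest =>
    let res := pvResolution (pvMaxLoop (first :: rest))
    let fin := rest.foldl (pvCellStep res) (pvCellInit res first)
    ([["0-little_to_no_demonstration", String.ofList fin.1, String.ofList fin.2.2.2.1],
      ["1-partially_demonstrated", String.ofList fin.2.1, String.ofList fin.2.2.2.2.1],
      ["2-demonstrated", String.ofList fin.2.2.1, String.ofList fin.2.2.2.2.2.1],
      ["Total", String.ofList fin.2.2.2.2.2.2, ""]],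
     pvNote res)

-- ===== PRECONDITION & SPEC =====
def Spec_build_layer3_dimension_histogram_rows (aggregate_counts : List (String × List (String × Int))) (out : List (List String) × String) : Prop := out = build_layer3_dimension_histogram_rows_alt aggregate_counts
instance (aggregate_counts : List (String × List (String × Int))) (out : List (List String) × String) : Decidable (Spec_build_layer3_dimension_histogram_rows aggregate_counts out) := by unfold Spec_build_layer3_dimension_histogram_rows; infer_instance

-- ===== CLAIM (what is proved, stated in full; the proofs are below) =====
def Claim_equal_build_layer3_dimension_histogram_rows : Prop := ∀ (aggregate_counts : List (String × List (String × Int))), Dom_build_layer3_dimension_histogram_rows aggregate_counts → Spec_build_layer3_dimension_histogram_rows aggregate_counts (build_layer3_dimension_histogram_rows aggregate_counts)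

-- ===== LEMMAS AND PROOFS =====

-- running max over a cons list equals foldl max
theorem pv_foldl_max_shift (t : List Int) : ∀ (d x : Int),
    t.foldl max (max d x) = max d (t.foldl max x) := by
  induction t with
  | nil => intro d x; rfl
  | cons a t ih => intro d x; simp only [List.foldl_cons, max_assoc]; exact ih d (max x a)

-- the if-step of pass 1 is max
theorem pv_if_is_max (m c : Int) : (if m < c then c else m) = max m c := by
  rw [max_comm, max_def]; split_ifs <;> omega

-- resolution is blind to clamping a maximum at 0
theorem pv_resolution_max_zero (m : Int) : pvResolution (max 0 m) = pvResolution m := by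
  unfold pvResolution
  by_cases h : m ≤ 0
  · rw [max_eq_left h]; simp [h]
  · rw [max_eq_right (by omega)]

-- B's pass 1 is foldl max over the flattened grid (dimension-outer, bins inner)
theorem pv_maxLoop_eq (present : List (PySem.Dict String Int)) :
    pvMaxLoop present =
      (present.flatMap
        (fun ctr => [ctr.getD pvRaw0 0, ctr.getD pvRaw1 0, ctr.getD pvRaw2 0])).foldl max 0 := by
  unfold pvMaxLoop
  rw [List.foldl_flatMap]
  simp only [List.foldl_cons, List.foldl_nil, pv_if_is_max]

-- A's generator max and B's running-max pass give the same resolution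
theorem pv_res_eq (ac : PySem.Dict String (PySem.Dict String Int)) :
    pvResolution (pvMaxLoop (pvPresent ac)) = pvResolution (pvMaxA ac (pvDims ac)) := by
  rw [pv_maxLoop_eq]
  unfold pvMaxA pvPresent pvDims
  rw [List.flatMap_map]
  have hflat : (List.filter (fun d => ac.contains d) ["D*1", "D*2", "D*3"]).flatMap
        (fun d => [(ac.getD d PySem.Dict.empty).getD pvRaw0 0,
                   (ac.getD d PySem.Dict.empty).getD pvRaw1 0,
                   (ac.getD d PySem.Dict.empty).getD pvRaw2 0])
      = (List.filter (fun d => ac.contains d) ["D*1", "D*2", "D*3"]).flatMap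
          (fun d => pvBins.map (fun b => pvCnt ac d b.2)) := by
    simp [pvBins, pvCnt, pvRaw0, pvRaw1, pvRaw2]
  rw [hflat]
  cases h : (List.filter (fun d => ac.contains d) ["D*1", "D*2", "D*3"]).flatMap
      (fun d => pvBins.map (fun b => pvCnt ac d b.2)) with
  | nil => rfl
  | cons x t =>
      unfold PySem.List.maxD
      rw [PySem.List.max?_id_cons, Option.getD_some, List.foldl_cons, pv_foldl_max_shift,
        pv_resolution_max_zero]

-- growing every cell with "<br>" + its piece over the remaining dimensions, from any seed
theorem pv_cells_fold (res : Int) (rest : List (PySem.Dict String Int)) :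
    ∀ st, rest.foldl (pvCellStep res) st =
      (st.1 ++ rest.flatMap (fun c => "<br>".toList ++ (PySem.Int.toStr (c.getD pvRaw0 0)).toList),
       st.2.1 ++ rest.flatMap (fun c => "<br>".toList ++ (PySem.Int.toStr (c.getD pvRaw1 0)).toList),
       st.2.2.1 ++ rest.flatMap (fun c => "<br>".toList ++ (PySem.Int.toStr (c.getD pvRaw2 0)).toList),
       st.2.2.2.1 ++ rest.flatMap (fun c => "<br>".toList ++ (pvBar (c.getD pvRaw0 0) res).toList),
       st.2.2.2.2.1 ++ rest.flatMap (fun c => "<br>".toList ++ (pvBar (c.getD pvRaw1 0) res).toList),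
       st.2.2.2.2.2.1 ++ rest.flatMap (fun c => "<br>".toList ++ (pvBar (c.getD pvRaw2 0) res).toList),
       st.2.2.2.2.2.2 ++ rest.flatMap (fun c => "<br>".toList ++ (PySem.Int.toStr c.values.sum).toList)) := by
  induction rest with
  | nil => intro st; simp
  | cons a t ih =>
      intro st
      rw [List.foldl_cons, ih]
      simp [pvCellStep, List.append_assoc]

-- "<br>".join over a nonempty map is seed-then-grow
theorem pv_join_cons {α : Type} (f : α → List Char) (first : α) (l : List α) :
    PySem.Chars.join "<br>".toList ((first :: l).map f)
      = f first ++ l.flatMap (fun x => "<br>".toList ++ f x) := by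
  induction l generalizing first with
  | nil => simp [PySem.Chars.join_singleton]
  | cons a t ih =>
      simp only [List.map_cons] at ih ⊢
      rw [PySem.Chars.join_cons_cons, ih a, List.flatMap_cons]
      simp [List.append_assoc]

-- a "<br>"-joined String cell, written as ofList of the grown char list
theorem pv_join_str {α : Type} (f : α → String) (first : α) (l : List α) :
    PySem.Str.join "<br>" ((first :: l).map f)
      = String.ofList ((f first).toList ++ l.flatMap (fun x => "<br>".toList ++ (f x).toList)) := by
  have hm : List.map (fun x => (f x).toList) (first :: l)
      = List.map String.toList (List.map f (first :: l)) := by rw [List.map_map]; rfl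
  rw [← pv_join_cons (fun x => (f x).toList) first l, hm, ← PySem.Str.toList_join,
    String.ofList_toList]

-- A's two-accumulator inner loop computes maps over the dimensions
theorem pv_lines_eq (ac : PySem.Dict String (PySem.Dict String Int)) (dims : List String)
    (res : Int) (raw : String) :
    pvLinesA ac dims res raw =
      (dims.map (fun d => PySem.Int.toStr (pvCnt ac d raw)),
       dims.map (fun d => pvBar (pvCnt ac d raw) res)) := by
  unfold pvLinesA
  rw [PySem.List.foldl_prod_mk
      (f := fun acc d => acc ++ [PySem.Int.toStr (pvCnt ac d raw)])
      (g := fun acc d => acc ++ [pvBar (pvCnt ac d raw) res])]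
  rw [PySem.List.foldl_append_singleton_eq_map, PySem.List.foldl_append_singleton_eq_map]
  simp

-- pvPresent is the mapped pvDims (definitional)
theorem pv_present_eq (ac : PySem.Dict String (PySem.Dict String Int)) :
    pvPresent ac = (pvDims ac).map (fun d => ac.getD d PySem.Dict.empty) := rfl

-- ===== VERDICT (by name: the statement is the Claim_ definition above) =====
theorem build_layer3_dimension_histogram_rows_spec : Claim_equal_build_layer3_dimension_histogram_rows := by
  intro a _
  unfold Spec_build_layer3_dimension_histogram_rows
  unfold build_layer3_dimension_histogram_rows build_layer3_dimension_histogram_rows_alt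
  cases h : pvDims (pvAC a) with
  | nil =>
      rw [if_pos rfl]
      have hp : pvPresent (pvAC a) = [] := by rw [pv_present_eq, h]; rfl
      rw [hp]
  | cons d ds =>
      rw [if_neg (by simp)]
      have hp : pvPresent (pvAC a) =
          (pvAC a).getD d PySem.Dict.empty :: ds.map (fun d' => (pvAC a).getD d' PySem.Dict.empty) := by
        rw [pv_present_eq, h, List.map_cons]
      have hres := pv_res_eq (pvAC a)
      rw [hp, h] at hres
      rw [hp]
      simp only [hres]
      rw [pv_cells_fold]
      simp only [pvCellInit, List.flatMap_map, pvRowsA, pvBins, pv_lines_eq,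
        List.foldl_cons, List.foldl_nil, pv_join_str, pvCnt, pvTotal, pvRaw0, pvRaw1, pvRaw2]
      rfl
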